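-- pv_equiv track=rewrite | github.com/kirkirey/2019-2-level-labs | lab_1/main.py | filter_stop_words
-- ===== SOURCE A (Python) =====
-- def filter_stop_words(frequencies: dict, stop_words: tuple) -> dict:
--     if frequencies == None:
--         return {}
--     elif stop_words == None:
--         return frequencies
--     else:
--         frequencies_clean = dict(frequencies)
--         stop_words_correct = []
--         for i in stop_words:
--             stop_words_correct.append(str(i))
--         for i in frequencies_clean.keys():
--             if type(i) != str:
--                 stop_words_correct.append(i)
--         for i in stop_words_correct:
--             if i in frequencies_clean.keys():
--                 frequencies_clean.pop(i)
--         return frequencies_clean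
-- ===== SOURCE B (Python) =====
-- def filter_stop_words(frequencies: dict, stop_words: tuple) -> dict:
--     if frequencies == None:
--         return {}
--     if stop_words == None:
--         return frequencies
--     stop = {str(w) for w in stop_words}
--     result = {}
--     for k, v in frequencies.items():
--         if type(k) == str and k not in stop:
--             result[k] = v
--     return result
-- ===== Notes on version B (the rewrite author's own statement) =====
-- stated objective: alternative
-- what changed: A copies the dict, accumulates a delete-list over three loops and pops each hit from the copy; B builds the stop set once and constructs a fresh result dict in a single selection pass that keeps surviving entries.
import Mathlib
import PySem

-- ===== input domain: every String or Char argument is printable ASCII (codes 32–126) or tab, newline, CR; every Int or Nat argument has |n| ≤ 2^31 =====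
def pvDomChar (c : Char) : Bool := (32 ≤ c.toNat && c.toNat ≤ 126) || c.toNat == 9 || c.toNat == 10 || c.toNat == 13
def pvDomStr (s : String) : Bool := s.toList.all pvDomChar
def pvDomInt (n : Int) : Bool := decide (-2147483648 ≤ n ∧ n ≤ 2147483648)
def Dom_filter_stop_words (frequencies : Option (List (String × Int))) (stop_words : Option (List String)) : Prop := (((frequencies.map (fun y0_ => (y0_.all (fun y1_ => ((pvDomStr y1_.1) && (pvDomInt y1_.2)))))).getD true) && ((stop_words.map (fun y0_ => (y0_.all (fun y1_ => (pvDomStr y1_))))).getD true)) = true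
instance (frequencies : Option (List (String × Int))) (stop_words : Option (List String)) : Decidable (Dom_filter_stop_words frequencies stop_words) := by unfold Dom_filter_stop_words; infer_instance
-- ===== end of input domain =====

-- ===== PORT A =====
-- A copies the dict, builds a delete-list (stringified stop words + non-str keys — the
-- latter branch never fires here since keys are String), then pops each listed key.
def filter_stop_words (frequencies : Option (List (String × Int))) (stop_words : Option (List String)) : List (String × Int) :=
  match frequencies with
  | none => []
  | some freqs =>
    match stop_words with
    | none => freqs
    | some sw =>
      let frequencies_clean := freqs
      let stop_words_correct := sw.foldl (fun acc i => acc ++ [i]) []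
      stop_words_correct.foldl
        (fun d i => if d.any (fun p => p.1 == i) then d.eraseP (fun p => p.1 == i) else d)
        frequencies_clean

-- ===== PORT B =====
-- B: build the stop set once, then one selection pass over the items constructing a
-- fresh result (the Python guard 'type(k) == str' is always true here: keys are String).
-- The item loop inserting into the fresh result dict, transcribed as structural recursion.
def pvSelect (stop : PySem.Set String) : List (String × Int) → List (String × Int)
  | [] => []
  | (k, v) :: rest =>
    if PySem.Set.contains stop k then pvSelect stop rest
    else (k, v) :: pvSelect stop rest

def filter_stop_words_alt (frequencies : Option (List (String × Int))) (stop_words : Option (List String)) : List (String × Int) :=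
  match frequencies, stop_words with
  | none, _ => []
  | some freqs, none => freqs
  | some freqs, some sw => pvSelect (PySem.Set.ofList sw) freqs

-- ===== PRECONDITION & SPEC =====
-- Pre_ excludes association lists whose keys contain duplicates: a Python dict cannot hold
-- duplicate keys, so such lists encode no input that A (or B) is ever called on.
def Pre_filter_stop_words (frequencies : Option (List (String × Int))) (stop_words : Option (List String)) : Prop :=
  ((frequencies.getD []).map Prod.fst).Nodup

instance (frequencies : Option (List (String × Int))) (stop_words : Option (List String)) : Decidable (Pre_filter_stop_words frequencies stop_words) := by
  unfold Pre_filter_stop_words; infer_instance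

def pvWitness_filter_stop_words : (Option (List (String × Int))) × Option (List String) :=
  (some [("the", 3), ("cat", 2)], some ["the", "a"])

def Spec_filter_stop_words (frequencies : Option (List (String × Int))) (stop_words : Option (List String)) (out : List (String × Int)) : Prop := out = filter_stop_words_alt frequencies stop_words
instance (frequencies : Option (List (String × Int))) (stop_words : Option (List String)) (out : List (String × Int)) : Decidable (Spec_filter_stop_words frequencies stop_words out) := by unfold Spec_filter_stop_words; infer_instance

-- ===== CLAIM (what is proved, stated in full; the proofs are below) =====
def Claim_equal_filter_stop_words : Prop := ∀ (frequencies : Option (List (String × Int))) (stop_words : Option (List String)), Dom_filter_stop_words frequencies stop_words → Pre_filter_stop_words frequencies stop_words → Spec_filter_stop_words frequencies stop_words (filter_stop_words frequencies stop_words)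

-- ===== LEMMAS AND PROOFS =====

-- building the delete-list by appending is just the list itself
theorem foldl_append_id (sw : List String) (acc : List String) :
    sw.foldl (fun acc i => acc ++ [i]) acc = acc ++ sw := by
  induction sw generalizing acc with
  | nil => simp
  | cons x t ih => simp [List.foldl, ih, List.append_assoc]

-- under nodup keys, one guarded pop equals filtering the key out
theorem pop_step_eq_filter (l : List (String × Int)) (i : String)
    (h : (l.map Prod.fst).Nodup) :
    (if l.any (fun p => p.1 == i) then l.eraseP (fun p => p.1 == i) else l)
      = l.filter (fun p => !(p.1 == i)) := by
  induction l with
  | nil => simp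
  | cons hd t ih =>
    simp only [List.map_cons, List.nodup_cons] at h
    by_cases hk : hd.1 = i
    · have ht : t.filter (fun p => !(p.1 == i)) = t := by
        apply List.filter_eq_self.mpr
        intro p hp
        have hm : p.1 ∈ t.map Prod.fst := List.mem_map_of_mem hp
        have : p.1 ≠ i := by
          intro e; rw [e, ← hk] at hm; exact h.1 hm
        simp [this]
      simp [List.any_cons, hk, ht]
    · have hne : (hd.1 == i) = false := by simp [hk]
      simp only [List.any_cons, hne, Bool.false_or, List.eraseP_cons, List.filter_cons,
        Bool.not_false, if_true]
      rw [← ih h.2]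
      split_ifs <;> rfl

-- filtering preserves nodup keys
theorem nodup_keys_filter (l : List (String × Int)) (q : String × Int → Bool)
    (h : (l.map Prod.fst).Nodup) : ((l.filter q).map Prod.fst).Nodup :=
  List.Nodup.sublist ((List.filter_sublist (p := q) (l := l)).map Prod.fst) h

-- the pop loop over the stop words equals one keep-pass filter
theorem foldl_pop_eq_filter (sw : List String) (l : List (String × Int))
    (h : (l.map Prod.fst).Nodup) :
    sw.foldl (fun d i => if d.any (fun p => p.1 == i) then d.eraseP (fun p => p.1 == i) else d) l
      = l.filter (fun p => !(sw.contains p.1)) := by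
  induction sw generalizing l with
  | nil => simp
  | cons x t ih =>
    simp only [List.foldl]
    rw [pop_step_eq_filter l x h,
        ih (l.filter (fun p => !(p.1 == x))) (nodup_keys_filter l _ h),
        List.filter_filter]
    apply List.filter_congr
    intro p _
    have hd : (p.1 == x) = decide (p.1 = x) := by
      by_cases hx : p.1 = x <;> simp [hx]
    simp [Bool.and_comm, hd]

-- B's selection recursion is the same keep-pass filter
theorem pvSelect_eq_filter (stop : PySem.Set String) (l : List (String × Int)) :
    pvSelect stop l = l.filter (fun p => !(PySem.Set.contains stop p.1)) := by
  induction l with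
  | nil => rfl
  | cons hd t ih =>
    obtain ⟨k, v⟩ := hd
    cases hcase : PySem.Set.contains stop k with
    | true => simp at hcase; simp [pvSelect, hcase, ih]
    | false => simp at hcase; simp [pvSelect, hcase, ih]

-- set membership via ofList is plain list membership
theorem contains_ofList (sw : List String) (k : String) :
    PySem.Set.contains (PySem.Set.ofList sw) k = sw.contains k := by
  simp [PySem.Set.mem_ofList]

-- ===== VERDICT (by name: the statement is the Claim_ definition above) =====
theorem filter_stop_words_spec : Claim_equal_filter_stop_words := by
  intro frequencies stop_words _ hpre
  unfold Spec_filter_stop_words filter_stop_words filter_stop_words_alt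
  cases frequencies with
  | none => rfl
  | some freqs =>
    cases stop_words with
    | none => rfl
    | some sw =>
      simp only []
      rw [foldl_append_id sw [], List.nil_append,
          foldl_pop_eq_filter sw freqs hpre, pvSelect_eq_filter]
      apply List.filter_congr
      intro p _
      rw [contains_ofList]
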